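-- pv_equiv track=rewrite | github.com/k-syou/TIL | CodingTest/Boj/boj_17135_castle_defense.py | get_arrow_shot
-- ===== SOURCE A (Python) =====
-- def get_arrow_shot(d):
--     w = 1
--     arrows = [[0, 0] for _ in range(d * 2 - 1)]
--     for i in range(d * 2 - 1):
--         if i + 1 <= d:
--             arrows[i][0] = -(i + 1)
--         else:
--             arrows[i][0] = -(i - w)
--             w += 1
--     for j in range(d * 2 - 1):
--         arrows[j][1] = j - (d - 1)
--
--     return arrows
-- ===== SOURCE B (Python) =====
-- def get_arrow_shot(d):
--     # Geometric decomposition: the arrow shape is a diagonal leg (cells -1..-d,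
--     # going down-right to the tip at [-d, 0]) followed by a horizontal leg at
--     # row -(d-1). No single 0..2d-2 pass, no branch.
--     diagonal = [[-k, k - d] for k in range(1, d + 1)]
--     horizontal = [[-(d - 1), c] for c in range(1, d)]
--     return diagonal + horizontal
-- ===== Notes on version B (the rewrite author's own statement) =====
-- stated objective: alternative
-- what changed: Instead of A's preallocate-then-mutate double pass over range(2d-1) with a running accumulator w, B constructs the V-shape geometrically as two independent legs over different index ranges -- a diagonal leg [[-k, k-d] for k in 1..d] and a horizontal leg [[-(d-1), c] for c in 1..d-1] -- concatenated, with no branch and no 0..2d-2 pass.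
import Mathlib
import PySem

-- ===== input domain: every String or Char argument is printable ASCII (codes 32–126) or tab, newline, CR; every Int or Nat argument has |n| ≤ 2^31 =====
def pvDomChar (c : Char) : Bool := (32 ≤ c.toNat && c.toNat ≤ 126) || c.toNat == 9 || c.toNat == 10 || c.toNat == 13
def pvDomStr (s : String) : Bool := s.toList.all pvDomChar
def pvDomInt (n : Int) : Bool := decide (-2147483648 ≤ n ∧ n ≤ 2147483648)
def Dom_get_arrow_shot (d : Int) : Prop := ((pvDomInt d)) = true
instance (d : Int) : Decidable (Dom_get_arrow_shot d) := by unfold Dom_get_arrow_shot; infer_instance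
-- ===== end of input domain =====

-- B builds the arrow V-shape geometrically as two legs (diagonal k=1..d, then horizontal c=1..d-1)
-- concatenated, instead of A's preallocate-then-mutate double pass with accumulator w (objective: alternative).


-- ===== PORT A =====
-- literal transliteration: preallocate `arrows`, then two mutation loops; arrows[i][0] = v is
-- `modify i.toNat (·.set 0 v)` (loop indices i, j are ≥ 0, so .toNat is exact)
def get_arrow_shot (d : Int) : List (List Int) :=
  let arrows : List (List Int) := (PySem.List.pyRange 0 (d * 2 - 1) 1).map (fun _ => [0, 0])
  let p : List (List Int) × Int :=
    (PySem.List.pyRange 0 (d * 2 - 1) 1).foldl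
      (fun (st : List (List Int) × Int) i =>
        if i + 1 ≤ d then
          (st.1.modify i.toNat (fun row => row.set 0 (-(i + 1))), st.2)
        else
          (st.1.modify i.toNat (fun row => row.set 0 (-(i - st.2))), st.2 + 1))
      (arrows, 1)
  (PySem.List.pyRange 0 (d * 2 - 1) 1).foldl
    (fun arrows j => arrows.modify j.toNat (fun row => row.set 1 (j - (d - 1)))) p.1

-- ===== PORT B =====
-- two comprehensions over different ranges, concatenated (Source B's structure)
def get_arrow_shot_alt (d : Int) : List (List Int) :=
  ((PySem.List.pyRange 1 (d + 1) 1).map (fun k => [-k, k - d]))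
  ++ ((PySem.List.pyRange 1 d 1).map (fun c => [-(d - 1), c]))

-- ===== PRECONDITION & SPEC =====
def Spec_get_arrow_shot (d : Int) (out : List (List Int)) : Prop := out = get_arrow_shot_alt d
instance (d : Int) (out : List (List Int)) : Decidable (Spec_get_arrow_shot d out) := by unfold Spec_get_arrow_shot; infer_instance

-- ===== CLAIM (what is proved, stated in full; the proofs are below) =====
def Claim_equal_get_arrow_shot : Prop := ∀ (d : Int), Dom_get_arrow_shot d → Spec_get_arrow_shot d (get_arrow_shot d)

-- ===== LEMMAS AND PROOFS =====

-- the ascending Int loop indices [0, 1, …, m-1]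
def pvIdx (m : Nat) : List Int := (List.range m).map (fun k : Nat => (k : Int))

-- the row value A's first loop writes (phrased over the Nat loop counter)
def pvRow (d : Int) (k : Nat) : Int := if (k : Int) + 1 ≤ d then -((k : Int) + 1) else -(d - 1)

-- the w accumulator after m iterations of A's first loop
def pvW (d : Int) (m : Nat) : Int := if (m : Int) ≤ d then 1 else (m : Int) - d + 1

-- state of A's first loop after m of N iterations
def pvArr (d : Int) (N m : Nat) : List (List Int) :=
  (List.range N).map (fun k => if k < m then [pvRow d k, 0] else [0, 0])

lemma pvIdx_succ (m : Nat) : pvIdx (m + 1) = pvIdx m ++ [((m : Nat) : Int)] := by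
  simp [pvIdx, List.range_succ]

lemma pyRange_zero_eq_pvIdx (b : Int) : PySem.List.pyRange 0 b 1 = pvIdx b.toNat := by
  rw [PySem.List.pyRange_one]
  simp only [Int.sub_zero, pvIdx]
  apply List.map_congr_left
  intro k _
  omega

lemma pvArr_step (d : Int) (N m : Nat) (_hm : m < N) (v : Int) (hv : v = pvRow d m) :
    (pvArr d N m).modify m (fun row => row.set 0 v) = pvArr d N (m + 1) := by
  apply List.ext_getElem
  · simp [pvArr, List.length_modify]
  · intro k h1 h2
    simp only [pvArr, List.length_modify, List.length_map, List.length_range] at h1 h2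
    rw [List.getElem_modify]
    by_cases hk : m = k
    · subst hk
      simp [pvArr, hv]
    · simp only [if_neg hk, pvArr, List.getElem_map, List.getElem_range]
      by_cases h : k < m
      · rw [if_pos h, if_pos (by omega)]
      · rw [if_neg h, if_neg (by omega)]

lemma firstLoop (d : Int) (hd : 1 ≤ d) (N : Nat) :
    ∀ m : Nat, m ≤ N →
    (pvIdx m).foldl
      (fun (st : List (List Int) × Int) i =>
        if i + 1 ≤ d then
          (st.1.modify i.toNat (fun row => row.set 0 (-(i + 1))), st.2)
        else
          (st.1.modify i.toNat (fun row => row.set 0 (-(i - st.2))), st.2 + 1))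
      (pvArr d N 0, 1)
    = (pvArr d N m, pvW d m) := by
  intro m
  induction m with
  | zero =>
    intro _
    have h0 : pvW d 0 = 1 := by
      simp only [pvW]
      rw [if_pos (by push_cast; omega)]
    simp [pvIdx, h0]
  | succ m ih =>
    intro hm
    have hm' : m < N := hm
    rw [pvIdx_succ, List.foldl_append, ih (by omega)]
    simp only [List.foldl_cons, List.foldl_nil]
    by_cases hc : ((m : Nat) : Int) + 1 ≤ d
    · rw [if_pos hc]
      simp only [Int.toNat_natCast]
      rw [pvArr_step d N m hm' _ (by
        simp only [pvRow]
        rw [if_pos (by exact_mod_cast hc)])]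
      have : pvW d m = pvW d (m + 1) := by
        simp only [pvW]
        push_cast at hc
        split_ifs <;> push_cast at * <;> omega
      rw [this]
    · rw [if_neg hc]
      simp only [Int.toNat_natCast]
      have hc' : ¬ ((m : Int) + 1 ≤ d) := by push_cast at hc ⊢; omega
      have hw : pvW d m = 1 + ((m : Int) - d) := by
        simp only [pvW]
        split_ifs <;> omega
      rw [pvArr_step d N m hm' _ (by
        simp only [pvRow]
        rw [if_neg hc', hw]
        ring)]
      have : pvW d m + 1 = pvW d (m + 1) := by
        simp only [pvW]
        split_ifs <;> push_cast at * <;> omega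
      rw [this]

lemma secondLoop (d : Int) (N : Nat) :
    ∀ m : Nat, m ≤ N →
    (pvIdx m).foldl
      (fun arrows j => arrows.modify j.toNat (fun row => row.set 1 (j - (d - 1))))
      (pvArr d N N)
    = (List.range N).map (fun k =>
        if k < m then [pvRow d k, (k : Int) - (d - 1)] else [pvRow d k, 0]) := by
  intro m
  induction m with
  | zero =>
    intro _
    simp only [pvIdx, List.range_zero, List.map_nil, List.foldl_nil, pvArr]
    apply List.map_congr_left
    intro k hk
    rw [if_pos (List.mem_range.mp hk), if_neg (by omega)]
  | succ m ih =>
    intro hm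
    rw [pvIdx_succ, List.foldl_append, ih (by omega)]
    simp only [List.foldl_cons, List.foldl_nil, Int.toNat_natCast]
    apply List.ext_getElem
    · simp [List.length_modify]
    · intro k h1 h2
      simp only [List.length_modify, List.length_map, List.length_range] at h1 h2
      rw [List.getElem_modify]
      by_cases hk : m = k
      · subst hk
        simp [List.getElem_map, List.getElem_range]
      · simp only [if_neg hk, List.getElem_map, List.getElem_range]
        by_cases h : k < m
        · rw [if_pos h, if_pos (by omega)]
        · rw [if_neg h, if_neg (by omega)]

lemma pvIdx_map_const (N : Nat) (d : Int) :
    (pvIdx N).map (fun _ => ([0, 0] : List Int)) = pvArr d N 0 := by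
  simp only [pvIdx, pvArr, List.map_map]
  apply List.map_congr_left
  intro k _
  rw [if_neg (by omega)]
  rfl

-- B's result unfolded to a single map over List.range (d + (d-1)), for d ≥ 1
lemma altEq (d : Int) (hd : 1 ≤ d) :
    get_arrow_shot_alt d
    = (List.range (d.toNat + (d - 1).toNat)).map (fun k =>
        [pvRow d k, (k : Int) - (d - 1)]) := by
  unfold get_arrow_shot_alt
  rw [List.range_add, List.map_append, List.map_map,
      PySem.List.pyRange_one 1 (d + 1), PySem.List.pyRange_one 1 d]
  have h1 : (d + 1 - 1).toNat = d.toNat := by omega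
  rw [h1]
  simp only [List.map_map]
  congr 1
  · apply List.map_congr_left
    intro k hk
    have hk' : k < d.toNat := List.mem_range.mp hk
    simp only [Function.comp, pvRow]
    rw [if_pos (by omega)]
    simp only [List.cons.injEq, and_true]
    constructor <;> omega
  · apply List.map_congr_left
    intro k hk
    have hk' : k < (d - 1).toNat := List.mem_range.mp hk
    simp only [Function.comp, pvRow]
    rw [if_neg (by omega)]
    simp only [List.cons.injEq, and_true, true_and]
    push_cast
    omega

-- ===== VERDICT (by name: the statement is the Claim_ definition above) =====
theorem get_arrow_shot_spec : Claim_equal_get_arrow_shot := by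
  unfold Claim_equal_get_arrow_shot
  intro d _
  unfold Spec_get_arrow_shot
  by_cases hd : 1 ≤ d
  · simp only [get_arrow_shot]
    set N : Nat := (d * 2 - 1).toNat with hN
    simp only [pyRange_zero_eq_pvIdx, ← hN]
    rw [pvIdx_map_const N d,
        firstLoop d hd N N (le_refl N), secondLoop d N N (le_refl N)]
    rw [altEq d hd]
    have hNsum : N = d.toNat + (d - 1).toNat := by omega
    rw [hNsum]
    apply List.map_congr_left
    intro k hk
    rw [if_pos (List.mem_range.mp hk)]
  · have hb : d * 2 - 1 ≤ 0 := by omega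
    have hb1 : d + 1 ≤ 1 := by omega
    have hb2 : d ≤ 1 := by omega
    simp only [get_arrow_shot, get_arrow_shot_alt,
      PySem.List.pyRange_one_eq_nil hb, PySem.List.pyRange_one_eq_nil hb1,
      PySem.List.pyRange_one_eq_nil hb2]
    simp
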